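-- pv_equiv track=rewrite | github.com/mahmoud-github/final-year-project | untitled139.py | extract_text_after_newline
-- ===== SOURCE A (Python) =====
-- def extract_text_after_newline(input_text):
--     d = ""
--     storeof = False
--     for y in input_text:
--         if not storeof and y == "\n":
--             storeof = True
--         else:
--             d += y
--     return d
-- ===== SOURCE B (Python) =====
-- def extract_text_after_newline(input_text):
--     i = input_text.find("\n")
--     if i == -1:
--         return input_text
--     return input_text[:i] + input_text[i + 1:]
-- ===== Notes on version B (the rewrite author's own statement) =====
-- stated objective: simpler
-- what changed: Replaces the per-character loop with a skip flag by locating the first newline with str.find and concatenating the two slices around it.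
import Mathlib
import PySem

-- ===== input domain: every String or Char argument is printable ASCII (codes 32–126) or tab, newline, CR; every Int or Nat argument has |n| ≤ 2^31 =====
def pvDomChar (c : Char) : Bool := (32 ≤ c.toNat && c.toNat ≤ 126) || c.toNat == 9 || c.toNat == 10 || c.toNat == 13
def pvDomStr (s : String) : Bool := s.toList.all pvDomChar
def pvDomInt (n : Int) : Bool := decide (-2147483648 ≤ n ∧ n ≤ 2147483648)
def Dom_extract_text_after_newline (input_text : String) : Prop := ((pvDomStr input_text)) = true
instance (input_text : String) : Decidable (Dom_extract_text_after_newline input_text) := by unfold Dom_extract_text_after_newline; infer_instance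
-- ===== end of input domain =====

-- ===== PORT A =====
-- A: per-character loop accumulating into d, with a skip flag for the first newline.
def extract_text_after_newline (input_text : String) : String :=
  let st := input_text.toList.foldl
    (fun (acc : List Char × Bool) y =>
      if acc.2 = false ∧ y = '\n' then (acc.1, true) else (acc.1 ++ [y], acc.2))
    ([], false)
  String.ofList st.1

-- ===== PORT B =====
-- B: find the first newline's index; if absent return the input, else concatenate the two slices around it.
def extract_text_after_newline_alt (input_text : String) : String :=
  let i := PySem.Str.find input_text "\n"
  if i = -1 then input_text
  else String.ofList (PySem.List.slice input_text.toList none (some i) ++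
                  PySem.List.slice input_text.toList (some (i + 1)) none)

-- ===== PRECONDITION & SPEC =====
def Spec_extract_text_after_newline (input_text : String) (out : String) : Prop := out = extract_text_after_newline_alt input_text
instance (input_text : String) (out : String) : Decidable (Spec_extract_text_after_newline input_text out) := by unfold Spec_extract_text_after_newline; infer_instance

-- ===== CLAIM (what is proved, stated in full; the proofs are below) =====
def Claim_equal_extract_text_after_newline : Prop := ∀ (input_text : String), Dom_extract_text_after_newline input_text → Spec_extract_text_after_newline input_text (extract_text_after_newline input_text)

-- ===== LEMMAS AND PROOFS =====

-- reference: remove the first newline of a character list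
def rmNl : List Char → List Char
  | [] => []
  | c :: cs => if c = '\n' then cs else c :: rmNl cs

theorem foldA_true (cs : List Char) (acc : List Char) :
    cs.foldl (fun (acc : List Char × Bool) y =>
      if acc.2 = false ∧ y = '\n' then (acc.1, true) else (acc.1 ++ [y], acc.2)) (acc, true)
      = (acc ++ cs, true) := by
  induction cs generalizing acc with
  | nil => simp
  | cons c cs ih => simp [List.foldl, ih]

theorem foldA_false (cs : List Char) (acc : List Char) :
    (cs.foldl (fun (acc : List Char × Bool) y =>
      if acc.2 = false ∧ y = '\n' then (acc.1, true) else (acc.1 ++ [y], acc.2)) (acc, false)).1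
      = acc ++ rmNl cs := by
  induction cs generalizing acc with
  | nil => simp [rmNl]
  | cons c cs ih =>
    by_cases h : c = '\n'
    · simp [List.foldl, h, rmNl, foldA_true]
    · simp [List.foldl, h, rmNl, ih]

theorem rmNl_of_not_mem (cs : List Char) (h : '\n' ∉ cs) : rmNl cs = cs := by
  induction cs with
  | nil => rfl
  | cons c cs ih =>
    simp only [List.mem_cons, not_or] at h
    simp [rmNl, Ne.symm h.1, ih h.2]

theorem rmNl_append (xs ys : List Char) (h : '\n' ∉ xs) :
    rmNl (xs ++ '\n' :: ys) = xs ++ ys := by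
  induction xs with
  | nil => simp [rmNl]
  | cons x xs ih =>
    simp only [List.mem_cons, not_or] at h
    simp [rmNl, Ne.symm h.1, ih h.2]

theorem rmNl_eq_take_drop (cs : List Char) (k : Nat)
    (hpre : ['\n'] <+: cs.drop k)
    (hmin : ∀ i, i < k → ¬ ['\n'] <+: cs.drop i) :
    rmNl cs = cs.take k ++ cs.drop (k + 1) := by
  obtain ⟨rest, hrest⟩ := hpre
  have hk : k < cs.length := by
    by_contra h
    push Not at h
    rw [List.drop_eq_nil_of_le h] at hrest
    simp at hrest
  have hsplit : cs = cs.take k ++ '\n' :: rest := by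
    conv_lhs => rw [← List.take_append_drop k cs]
    rw [← hrest]; rfl
  have hnot : '\n' ∉ cs.take k := by
    intro hmem
    obtain ⟨i, hi, hget⟩ := List.getElem_of_mem hmem
    have hilen : i < k := lt_of_lt_of_le hi (by simp)
    apply hmin i hilen
    have : cs.drop i = '\n' :: cs.drop (i + 1) := by
      rw [List.drop_eq_getElem_cons (by omega)]
      congr 1
      have := hget
      rwa [List.getElem_take] at this
    rw [this]
    exact ⟨cs.drop (i + 1), rfl⟩
  have hdrop : cs.drop (k + 1) = rest := by
    have h1 : cs.drop (k + 1) = List.drop 1 (cs.drop k) := by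
      rw [List.drop_drop]
    rw [h1, ← hrest]
    simp
  rw [hdrop]
  conv_lhs => rw [hsplit]
  exact rmNl_append _ _ hnot

-- ===== VERDICT (by name: the statement is the Claim_ definition above) =====
theorem extract_text_after_newline_spec : Claim_equal_extract_text_after_newline := by
  intro s _
  unfold Spec_extract_text_after_newline extract_text_after_newline extract_text_after_newline_alt
  simp only [PySem.Str.find_eq]
  have hA : String.ofList ((s.toList.foldl
      (fun (acc : List Char × Bool) y =>
        if acc.2 = false ∧ y = '\n' then (acc.1, true) else (acc.1 ++ [y], acc.2)) ([], false)).1)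
      = String.ofList (rmNl s.toList) := by
    rw [foldA_false]; rfl
  rw [hA]
  by_cases h : PySem.Chars.find s.toList "\n".toList = -1
  · rw [if_pos h]
    have hnm : ¬ ['\n'] <:+: s.toList := by
      have := (PySem.Chars.find_eq_neg_one_iff s.toList "\n".toList).mp h
      simpa using this
    have hne : '\n' ∉ s.toList := by
      intro hmem
      obtain ⟨u, v, huv⟩ := List.append_of_mem hmem
      exact hnm ⟨u, v, by simp [huv]⟩
    rw [rmNl_of_not_mem _ hne]
    exact String.ofList_toList
  · rw [if_neg h]
    have hnn : 0 ≤ PySem.Chars.find s.toList "\n".toList :=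
      (PySem.Chars.find_nonneg_iff s.toList "\n".toList).mpr
        ((PySem.Chars.find_ne_neg_one_iff s.toList "\n".toList).mp h)
    obtain ⟨hpre, hmin⟩ := PySem.Chars.find_spec (s := s.toList) (sub := "\n".toList) hnn
    set i := PySem.Chars.find s.toList "\n".toList with hi
    have hcast : i = ((i.toNat : Nat) : Int) := by omega
    have hslice1 : PySem.List.slice s.toList none (some i) = s.toList.take i.toNat := by
      rw [hcast, PySem.List.slice_to_natCast]; simp; omega
    have hslice2 : PySem.List.slice s.toList (some (i + 1)) none = s.toList.drop (i.toNat + 1) := by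
      rw [hcast]
      have : ((i.toNat : Nat) : Int) + 1 = ((i.toNat + 1 : Nat) : Int) := by push_cast; ring
      rw [this, PySem.List.slice_from_natCast]; simp; omega
    rw [hslice1, hslice2]
    congr 1
    exact rmNl_eq_take_drop s.toList i.toNat (by simpa using hpre) (fun j hj => by simpa using hmin j hj)
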